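-- pv_equiv track=rewrite | github.com/cafe-jun/codingTest-Algo | toss/test5.py | solution
-- ===== SOURCE A (Python) =====
-- from collections import defaultdict
--
-- def solution(tasks):
--     answer = 0
--     task_dict = defaultdict(int)
--     for tasks in tasks:
--         task_dict[tasks] += 1
--
--     for k in task_dict.keys():
--         if task_dict[k] <= 1:
--             answer = -1
--             break
--         answer += task_dict[k] // 3
--         task_dict[k] = task_dict[k] % 3
--         answer += task_dict[k] // 2
--         task_dict[k] = task_dict[k] % 2
--         if task_dict[k] >= 1:
--             answer += 1
--
--     return answer
-- ===== SOURCE B (Python) =====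
-- def solution(tasks):
--     s = sorted(tasks)
--     answer = 0
--     while s:
--         x = s[0]
--         c = 1
--         while c < len(s) and s[c] == x:
--             c += 1
--         if c <= 1:
--             return -1
--         answer += -(-c // 3)
--         s = s[c:]
--     return answer
-- ===== Notes on version B (the rewrite author's own statement) =====
-- stated objective: alternative
-- what changed: Replaces the defaultdict hash-counting plus stepwise //3, %3, //2, %2, +1 greedy arithmetic with a sort-then-scan over equal runs, using the closed-form ceiling -(-c//3) per run.
import Mathlib
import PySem

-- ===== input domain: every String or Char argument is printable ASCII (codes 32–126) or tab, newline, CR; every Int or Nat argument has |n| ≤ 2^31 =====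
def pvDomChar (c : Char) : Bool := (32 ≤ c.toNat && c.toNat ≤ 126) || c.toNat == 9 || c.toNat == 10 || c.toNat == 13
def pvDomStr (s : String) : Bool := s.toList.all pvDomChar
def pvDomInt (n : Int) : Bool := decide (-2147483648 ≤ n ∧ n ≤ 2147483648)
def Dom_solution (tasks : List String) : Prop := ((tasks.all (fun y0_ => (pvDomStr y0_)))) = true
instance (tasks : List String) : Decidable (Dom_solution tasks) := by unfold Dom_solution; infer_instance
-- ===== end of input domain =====

-- B replaces A's hash-counting with stepwise //3,%3,//2,%2,+1 arithmetic by a sort-then-run-scan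
-- with a closed-form ceiling -(-c//3) per run; an alternative of similar cost, not claimed faster.

-- ===== PORT A =====
-- second loop of A: iterate over the dict keys, with the 'break' as an early return of -1
def pvLoopA : PySem.Dict String Int → List String → Int → Int
  | _, [], ans => ans
  | d, k :: ks, ans =>
    if d.getD k 0 ≤ 1 then -1
    else
      let ans1 := ans + PySem.Int.floordiv (d.getD k 0) 3
      let d1 := d.insert k (PySem.Int.mod (d.getD k 0) 3)
      let ans2 := ans1 + PySem.Int.floordiv (d1.getD k 0) 2
      let d2 := d1.insert k (PySem.Int.mod (d1.getD k 0) 2)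
      let ans3 := if 1 ≤ d2.getD k 0 then ans2 + 1 else ans2
      pvLoopA d2 ks ans3

def solution (tasks : List String) : Int :=
  let d := tasks.foldl (fun d t => d.insert t (d.getD t 0 + 1)) PySem.Dict.empty
  pvLoopA d d.keys 0

-- ===== PORT B =====
-- inner while of B: how many further elements equal to x follow at the front of the remainder
def pvRunLen (x : String) : List String → Nat
  | [] => 0
  | y :: ys => if y = x then pvRunLen x ys + 1 else 0

-- outer while of B: c = 1 + pvRunLen; 's = s[c:]' is rest.drop (pvRunLen …)
def pvLoopB : List String → Int → Int
  | [], ans => ans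
  | x :: rest, ans =>
    let c : Int := 1 + (pvRunLen x rest : Int)
    if c ≤ 1 then -1
    else pvLoopB (rest.drop (pvRunLen x rest)) (ans + -(PySem.Int.floordiv (-c) 3))
termination_by s _ => s.length
decreasing_by simp only [List.length_drop, List.length_cons]; omega

def solution_alt (tasks : List String) : Int :=
  pvLoopB (PySem.List.sorted tasks (fun x => x) false) 0

-- ===== PRECONDITION & SPEC =====
def Spec_solution (tasks : List String) (out : Int) : Prop := out = solution_alt tasks
instance (tasks : List String) (out : Int) : Decidable (Spec_solution tasks out) := by unfold Spec_solution; infer_instance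

-- ===== CLAIM (what is proved, stated in full; the proofs are below) =====
def Claim_equal_solution : Prop := ∀ (tasks : List String), Dom_solution tasks → Spec_solution tasks (solution tasks)

-- ===== LEMMAS AND PROOFS =====

-- the ceiling added per run in B
def pvCeil (c : Int) : Int := -(PySem.Int.floordiv (-c) 3)

-- common abstraction: fold over the list of group counts, -1 on any count ≤ 1
def pvG : List Int → Int → Int
  | [], ans => ans
  | c :: cs, ans => if c ≤ 1 then -1 else pvG cs (ans + pvCeil c)

lemma pvG_eq (cs : List Int) (ans : Int) :
    pvG cs ans = if ∃ c ∈ cs, c ≤ 1 then -1 else ans + (cs.map pvCeil).sum := by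
  induction cs generalizing ans with
  | nil => simp [pvG]
  | cons c cs ih =>
    by_cases hc : c ≤ 1
    · simp [pvG, hc]
    · have hstep : pvG (c :: cs) ans = pvG cs (ans + pvCeil c) := by simp [pvG, hc]
      rw [hstep, ih]
      have hiff : (∃ x ∈ cs, x ≤ 1) ↔ (∃ x ∈ c :: cs, x ≤ 1) := by
        constructor
        · rintro ⟨x, hx, hle⟩; exact ⟨x, List.mem_cons_of_mem _ hx, hle⟩
        · rintro ⟨x, hx, hle⟩
          rcases List.mem_cons.mp hx with he | hm
          · exact absurd (he ▸ hle) hc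
          · exact ⟨x, hm, hle⟩
      by_cases h : ∃ x ∈ cs, x ≤ 1
      · rw [if_pos h, if_pos (hiff.mp h)]
      · rw [if_neg h, if_neg (fun hx => h (hiff.mpr hx))]
        simp only [List.map_cons, List.sum_cons]
        ring

lemma pvG_perm {cs1 cs2 : List Int} (h : cs1.Perm cs2) (ans : Int) :
    pvG cs1 ans = pvG cs2 ans := by
  rw [pvG_eq, pvG_eq, (h.map pvCeil).sum_eq]
  have hiff : (∃ c ∈ cs1, c ≤ 1) ↔ (∃ c ∈ cs2, c ≤ 1) := by
    constructor
    · rintro ⟨c, hc, hle⟩; exact ⟨c, h.mem_iff.mp hc, hle⟩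
    · rintro ⟨c, hc, hle⟩; exact ⟨c, h.mem_iff.mpr hc, hle⟩
  by_cases h1 : ∃ c ∈ cs1, c ≤ 1
  · rw [if_pos h1, if_pos (hiff.mp h1)]
  · rw [if_neg h1, if_neg (fun hx => h1 (hiff.mpr hx))]

-- A's per-key arithmetic equals the ceiling when the count is > 1
lemma pvStep (c : Int) (_h : ¬ c ≤ 1) :
    PySem.Int.floordiv c 3 + PySem.Int.floordiv (PySem.Int.mod c 3) 2
      + (if 1 ≤ PySem.Int.mod (PySem.Int.mod c 3) 2 then (1 : Int) else 0) = pvCeil c := by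
  unfold pvCeil
  rw [PySem.Int.floordiv_eq_ediv_of_pos (by omega : (0:Int) < 3),
      PySem.Int.mod_eq_emod_of_pos (by omega : (0:Int) < 3),
      PySem.Int.floordiv_eq_ediv_of_pos (by omega : (0:Int) < 2),
      PySem.Int.mod_eq_emod_of_pos (by omega : (0:Int) < 2),
      PySem.Int.floordiv_eq_ediv_of_pos (by omega : (0:Int) < 3)]
  split_ifs with h1 <;> omega

lemma pvLoopA_eq (f : String → Int) :
    ∀ (ks : List String) (d : PySem.Dict String Int) (ans : Int),
      ks.Nodup → (∀ k ∈ ks, d.getD k 0 = f k) →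
      pvLoopA d ks ans = pvG (ks.map f) ans := by
  intro ks
  induction ks with
  | nil => intro d ans _ _; rfl
  | cons k ks ih =>
    intro d ans hnd hf
    have hk : d.getD k 0 = f k := hf k (by simp)
    simp only [pvLoopA, List.map_cons, pvG, hk, PySem.Dict.getD_insert_self]
    by_cases hle : f k ≤ 1
    · rw [if_pos hle, if_pos hle]
    · rw [if_neg hle, if_neg hle]
      rw [ih _ _ (List.nodup_cons.mp hnd).2 (by
        intro k' hk'
        have hne : k' ≠ k := fun he => (List.nodup_cons.mp hnd).1 (he ▸ hk')
        rw [PySem.Dict.getD_insert_of_ne _ _ _ hne, PySem.Dict.getD_insert_of_ne _ _ _ hne]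
        exact hf k' (List.mem_cons_of_mem _ hk'))]
      congr 1
      have harith := pvStep (f k) hle
      split_ifs with hx
      · rw [if_pos hx] at harith; linarith
      · rw [if_neg hx] at harith; linarith

-- B: run-length decomposition of the sorted list as (key, count) pairs
def pvRunsP : List String → List (String × Int)
  | [] => []
  | x :: rest => (x, 1 + (pvRunLen x rest : Int)) :: pvRunsP (rest.drop (pvRunLen x rest))
termination_by s => s.length
decreasing_by simp only [List.length_drop, List.length_cons]; omega

lemma pvLoopB_eq_aux :
    ∀ (n : Nat) (s : List String), s.length ≤ n → ∀ (ans : Int),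
      pvLoopB s ans = pvG ((pvRunsP s).map Prod.snd) ans := by
  intro n
  induction n with
  | zero =>
    intro s hs ans
    have : s = [] := List.length_eq_zero_iff.mp (Nat.le_zero.mp hs)
    subst this; simp [pvLoopB, pvRunsP, pvG]
  | succ n ih =>
    intro s hs ans
    match s with
    | [] => simp [pvLoopB, pvRunsP, pvG]
    | x :: rest =>
      simp only [pvLoopB, pvRunsP, List.map_cons, pvG, pvCeil]
      split_ifs with h
      · rfl
      · exact ih _ (by
          simp only [List.length_cons] at hs
          simp only [List.length_drop]
          omega) _

lemma pvLoopB_eq (s : List String) (ans : Int) :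
    pvLoopB s ans = pvG ((pvRunsP s).map Prod.snd) ans :=
  pvLoopB_eq_aux s.length s le_rfl ans

-- facts about the first run of a sorted list
lemma pvRun_facts (x : String) :
    ∀ (rest : List String), List.Pairwise (· ≤ ·) (x :: rest) →
      ((pvRunLen x rest : Int) = rest.count x ∧
       x ∉ rest.drop (pvRunLen x rest) ∧
       (∀ y, y ≠ x → (rest.drop (pvRunLen x rest)).count y = rest.count y)) := by
  intro rest
  induction rest with
  | nil => intro _; simp [pvRunLen]
  | cons y ys ih =>
    intro h
    have hxy : x ≤ y := (List.pairwise_cons.mp h).1 y (by simp)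
    have hxys : ∀ z ∈ ys, x ≤ z := fun z hz => (List.pairwise_cons.mp h).1 z (by simp [hz])
    have hys : List.Pairwise (· ≤ ·) (y :: ys) := (List.pairwise_cons.mp h).2
    by_cases hyx : y = x
    · have hx' : List.Pairwise (· ≤ ·) (x :: ys) :=
        List.pairwise_cons.mpr ⟨hxys, (List.pairwise_cons.mp hys).2⟩
      obtain ⟨ih1, ih2, ih3⟩ := ih hx'
      simp only [pvRunLen, if_pos hyx]
      refine ⟨?_, ?_, ?_⟩
      · have hb : (y == x) = true := by simp [hyx]
        rw [List.count_cons, if_pos hb]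
        push_cast
        omega
      · rw [List.drop_succ_cons]
        exact ih2
      · intro z hz
        rw [List.drop_succ_cons, ih3 z hz, List.count_cons]
        have hb : (y == z) = false := beq_eq_false_iff_ne.mpr (fun he => hz (he.symm.trans hyx))
        rw [hb]
        simp
    · have hxltnem : x ∉ y :: ys := by
        intro hmem
        have hxlty : x < y := lt_of_le_of_ne hxy (fun he => hyx he.symm)
        rcases List.mem_cons.mp hmem with he | hm
        · exact hyx he.symm
        · have : y ≤ x := (List.pairwise_cons.mp hys).1 x hm
          exact absurd (lt_of_lt_of_le hxlty this) (lt_irrefl x)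
      refine ⟨?_, ?_, ?_⟩
      · simp only [pvRunLen, if_neg hyx]
        rw [List.count_eq_zero.mpr hxltnem]
      · simp only [pvRunLen, if_neg hyx, List.drop_zero]
        exact hxltnem
      · intro z hz
        simp only [pvRunLen, if_neg hyx, List.drop_zero]

-- run keys of a sorted list: the second components are the counts, the keys are nodup and exhaust the members
lemma pvRunsP_facts_aux :
    ∀ (n : Nat) (s : List String), s.length ≤ n → List.Pairwise (· ≤ ·) s →
      ((pvRunsP s).map Prod.snd = ((pvRunsP s).map Prod.fst).map (fun k => (s.count k : Int))) ∧
      ((pvRunsP s).map Prod.fst).Nodup ∧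
      (∀ y, y ∈ (pvRunsP s).map Prod.fst ↔ y ∈ s) := by
  intro n
  induction n with
  | zero =>
    intro s hs _
    have : s = [] := List.length_eq_zero_iff.mp (Nat.le_zero.mp hs)
    subst this; simp [pvRunsP]
  | succ n ih =>
    intro s hs hsorted
    match s with
    | [] => simp [pvRunsP]
    | x :: rest =>
      obtain ⟨hcnt, hxnot, hpres⟩ := pvRun_facts x rest hsorted
      have hsorted' : List.Pairwise (· ≤ ·) (rest.drop (pvRunLen x rest)) :=
        List.Pairwise.sublist ((List.drop_sublist _ _).trans (List.sublist_cons_self x rest)) hsorted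
      have hlen : (rest.drop (pvRunLen x rest)).length ≤ n := by
        simp only [List.length_cons] at hs
        simp only [List.length_drop]
        omega
      obtain ⟨ihv, ihnd, ihmem⟩ := ih _ hlen hsorted'
      have hmem_drop : ∀ y, y ∈ rest.drop (pvRunLen x rest) ↔ (y ∈ rest ∧ y ≠ x) := by
        intro y
        constructor
        · intro hy
          exact ⟨(List.drop_sublist _ _).subset hy, fun he => hxnot (he ▸ hy)⟩
        · rintro ⟨hy, hyx⟩
          have hpos : 0 < rest.count y := List.count_pos_iff.mpr hy
          exact List.count_pos_iff.mp ((hpres y hyx) ▸ hpos)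
      refine ⟨?_, ?_, ?_⟩
      · simp only [pvRunsP, List.map_cons]
        congr 1
        · rw [List.count_cons_self]
          push_cast
          omega
        · rw [ihv]
          apply List.map_congr_left
          intro k hk
          have hk' : k ∈ rest.drop (pvRunLen x rest) := (ihmem k).mp hk
          have hkx : k ≠ x := ((hmem_drop k).mp hk').2
          have hn : (rest.drop (pvRunLen x rest)).count k = (x :: rest).count k := by
            rw [hpres k hkx, List.count_cons]
            have hb : (x == k) = false := beq_eq_false_iff_ne.mpr (fun he => hkx he.symm)
            rw [hb]; simp
          exact congrArg _ hn
      · simp only [pvRunsP, List.map_cons, List.nodup_cons]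
        exact ⟨fun hx => hxnot ((ihmem x).mp hx), ihnd⟩
      · intro y
        simp only [pvRunsP, List.map_cons, List.mem_cons, ihmem, hmem_drop]
        constructor
        · rintro (he | ⟨hy, _⟩)
          · exact Or.inl he
          · exact Or.inr hy
        · rintro (he | hy)
          · exact Or.inl he
          · by_cases hyx : y = x
            · exact Or.inl hyx
            · exact Or.inr ⟨hy, hyx⟩

-- ===== VERDICT (by name: the statement is the Claim_ definition above) =====
theorem solution_spec : Claim_equal_solution := by
  intro tasks _
  unfold Spec_solution
  simp only [solution, solution_alt]
  rw [PySem.Dict.foldl_insert_getD_add_one_eq_counter, PySem.Dict.keys_counter]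
  rw [pvLoopA_eq (fun k => (tasks.count k : Int)) _ _ _
      (PySem.Set.nodup_ofList tasks)
      (fun k _ => PySem.Dict.getD_counter tasks k)]
  set s := PySem.List.sorted tasks (fun x => x) false with hs
  have hperm : s.Perm tasks := PySem.List.sorted_perm tasks (fun x => x) false
  have hsorted : List.Pairwise (· ≤ ·) s := PySem.List.sorted_pairwise tasks (fun x => x)
  rw [pvLoopB_eq]
  obtain ⟨hv, hnd, hmem⟩ := pvRunsP_facts_aux s.length s le_rfl hsorted
  rw [hv]
  have hmap : ((pvRunsP s).map Prod.fst).map (fun k => (s.count k : Int))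
      = ((pvRunsP s).map Prod.fst).map (fun k => (tasks.count k : Int)) := by
    apply List.map_congr_left
    intro k _
    exact congrArg _ (hperm.count_eq k)
  rw [hmap]
  have hkeysperm : (PySem.Set.ofList tasks : List String).Perm ((pvRunsP s).map Prod.fst) := by
    rw [List.perm_ext_iff_of_nodup (PySem.Set.nodup_ofList tasks) hnd]
    intro a
    rw [PySem.Set.mem_ofList, hmem, hperm.mem_iff]
  exact pvG_perm (hkeysperm.map (fun k => (tasks.count k : Int))) 0
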